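-- pv_equiv track=rewrite | github.com/ljy21123/DEU-Capstone-I | calculator.py | bumpiness_height
-- ===== SOURCE A (Python) =====
-- def bumpiness_height(field: int):
--     result = 0
--     height = []
--     # 필드의 가로 넓이 만큼 반복
--     for x in range(1, len(field[0]) - 1):
--         # 해당 열의 높이 0 부터 처음 블록이 나올때 까지 빈 공간 개수
--         void_count = 0
--         # 필드의 높이 만큼 반복
--         for y in range(len(field) - 1):
--             # 빈 공간이라면 카운트 +1
--             if field[y][x] == 0:
--                 void_count += 1
--             # 블록을 만났다면
--             else:
--                 break
--         # 전체 높이 - 빈공간 개수 - 바닥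
--         height.append(len(field) - void_count - 1)
--     for i in range(1, len(height)):
--         result += abs(height[i-1] - height[i])
--
--     return result
-- ===== SOURCE B (Python) =====
-- def bumpiness_height(field: int):
--     # Level-crossing algorithm: bumpiness = sum over levels (rows scanned top-down)
--     # of the number of adjacent interior column pairs where exactly one column
--     # already has a block at or above that level.  No column heights are computed.
--     rows = len(field)
--     width = len(field[0])
--     seen = [False] * width
--     result = 0
--     for y in range(rows - 1):
--         row = field[y]
--         for x in range(1, width - 1):
--             if row[x] != 0:
--                 seen[x] = True
--         for x in range(1, width - 2):
--             if seen[x] != seen[x + 1]: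
--                 result += 1
--     return result
-- ===== Notes on version B (the rewrite author's own statement) =====
-- stated objective: alternative
-- what changed: Replaced A's per-column height computation plus adjacent-height differences by a level-crossing count: one top-down scan over the rows maintains a per-column 'block already seen' boolean vector and adds 1 per row for every adjacent interior pair whose booleans differ; no column heights are ever computed (bumpiness = number of level crossings since |h1-h2| = #levels where exactly one column reaches).
-- outside the precondition, e.g. on bumpiness_height([[1, 1, 1], [5], [0, 0, 0]]): A returns 0, B raises IndexError
import Mathlib
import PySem

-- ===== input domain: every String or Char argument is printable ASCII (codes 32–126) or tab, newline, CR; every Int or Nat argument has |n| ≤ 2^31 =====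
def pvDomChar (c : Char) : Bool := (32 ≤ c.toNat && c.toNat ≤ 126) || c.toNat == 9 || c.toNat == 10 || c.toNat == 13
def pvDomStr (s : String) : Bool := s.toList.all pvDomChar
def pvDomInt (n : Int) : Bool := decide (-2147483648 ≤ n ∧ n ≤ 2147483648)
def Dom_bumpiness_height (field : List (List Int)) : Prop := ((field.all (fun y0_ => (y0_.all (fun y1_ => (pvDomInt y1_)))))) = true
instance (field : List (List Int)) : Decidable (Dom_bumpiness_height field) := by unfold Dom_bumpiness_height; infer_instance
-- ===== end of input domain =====

-- B replaces A's per-column height differences by a level-crossing count: it scans the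
-- rows once, maintaining a per-column "block seen above this level" boolean vector, and
-- adds 1 for every adjacent interior pair whose booleans differ; no heights are computed
-- (objective: alternative).

-- ===== PORT A =====
-- inner loop of A: count empty cells of column x from the top until the first block (break)
def pvAVoid (field : List (List Int)) (x : Int) : List Int → Int → Int
  | [], void_count => void_count
  | y :: ys, void_count =>
    if PySem.List.pyGetD (PySem.List.pyGetD field y []) x 0 = 0 then
      pvAVoid field x ys (void_count + 1)
    else void_count

-- final loop of A: result += abs(height[i-1] - height[i]) over consecutive entries
def pvADiffs : List Int → Int
  | a :: b :: t => |a - b| + pvADiffs (b :: t)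
  | _ => 0

def bumpiness_height (field : List (List Int)) : Int :=
  let height := (PySem.List.pyRange 1 ((((PySem.List.pyGet? field 0).getD []).length : Int) - 1) 1).map
    (fun x => (field.length : Int)
      - pvAVoid field x (PySem.List.pyRange 0 ((field.length : Int) - 1) 1) 0 - 1)
  pvADiffs height

-- ===== PORT B =====
-- B's first inner loop over a row: 'if row[x] != 0: seen[x] = True' for x in range(1, width-1)
def pvBMark (row : List Int) : List Int → List Bool → List Bool
  | [], seen => seen
  | x :: xs, seen =>
    pvBMark row xs (if PySem.List.pyGetD row x 0 ≠ 0 then PySem.List.pySetD seen x true else seen)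

-- B's second inner loop: 'if seen[x] != seen[x+1]: result += 1' for x in range(1, width-2)
def pvBCross (seen : List Bool) : List Int → Int → Int
  | [], result => result
  | x :: xs, result =>
    pvBCross seen xs
      (if PySem.List.pyGetD seen x false ≠ PySem.List.pyGetD seen (x + 1) false then result + 1
       else result)

-- B's outer loop over the rows, threading the seen vector and the result
def pvBRows (field : List (List Int)) (width : Int) : List Int → List Bool → Int → Int
  | [], _, result => result
  | y :: ys, seen, result =>
    let seen' := pvBMark (PySem.List.pyGetD field y []) (PySem.List.pyRange 1 (width - 1) 1) seen
    pvBRows field width ys seen'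
      (pvBCross seen' (PySem.List.pyRange 1 (width - 2) 1) result)

def bumpiness_height_alt (field : List (List Int)) : Int :=
  let width : Int := (((PySem.List.pyGet? field 0).getD []).length : Int)
  pvBRows field width (PySem.List.pyRange 0 ((field.length : Int) - 1) 1)
    (List.replicate width.toNat false) 0

-- ===== PRECONDITION & SPEC =====
-- Pre_ excludes the empty field (A raises IndexError on field[0]) and, when there are
-- interior columns (width ≥ 3), ragged fields whose scanned rows (all but the last) are
-- shorter than width-1: on those A raises IndexError except when an earlier nonzero cell
-- happens to break a column scan first — which cells are reached is an accident of A's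
-- access order (B's row scan reaches them all and raises).
def Pre_bumpiness_height (field : List (List Int)) : Prop :=
  field ≠ [] ∧ (3 ≤ (field.headD []).length →
    ∀ row ∈ field.dropLast, (field.headD []).length - 1 ≤ row.length)
instance (field : List (List Int)) : Decidable (Pre_bumpiness_height field) := by
  unfold Pre_bumpiness_height; infer_instance

def pvWitness_bumpiness_height : List (List Int) := [[0, 0, 0], [1, 1, 1]]

def Spec_bumpiness_height (field : List (List Int)) (out : Int) : Prop := out = bumpiness_height_alt field
instance (field : List (List Int)) (out : Int) : Decidable (Spec_bumpiness_height field out) := by unfold Spec_bumpiness_height; infer_instance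

-- ===== CLAIM (what is proved, stated in full; the proofs are below) =====
def Claim_equal_bumpiness_height : Prop := ∀ (field : List (List Int)), Dom_bumpiness_height field → Pre_bumpiness_height field → Spec_bumpiness_height field (bumpiness_height field)

-- ===== LEMMAS AND PROOFS =====

-- proof-side helpers: count of trues, pointwise mismatches, prefix-or, leading falses
def pvCnt : List Bool → Int
  | [] => 0
  | b :: bs => (if b then 1 else 0) + pvCnt bs

def pvMism : List Bool → List Bool → Int
  | b :: bs, c :: cs => (if b ≠ c then 1 else 0) + pvMism bs cs
  | _, _ => 0

def pvPO : List Bool → Bool → List Bool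
  | [], _ => []
  | b :: bs, acc => (acc || b) :: pvPO bs (acc || b)

def pvVA : List Bool → Int
  | [] => 0
  | b :: bs => if b then 0 else 1 + pvVA bs

-- "once true, always true": the shape of a prefix-or column over time
def pvMono : List Bool → Prop
  | [] => True
  | b :: bs => (b = true → ∀ c ∈ bs, c = true) ∧ pvMono bs

-- A's accumulator-style void counter equals the pure leading-false count
lemma pvAVoid_eq_pvVA (field : List (List Int)) (x : Int) :
    ∀ (ys : List Int) (a : Int),
      pvAVoid field x ys a
        = a + pvVA (ys.map (fun y =>
            decide (PySem.List.pyGetD (PySem.List.pyGetD field y []) x 0 ≠ 0))) := by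
  intro ys
  induction ys with
  | nil => intro a; simp [pvAVoid, pvVA]
  | cons y ys ih =>
    intro a
    simp only [pvAVoid, List.map_cons, pvVA]
    by_cases h : PySem.List.pyGetD (PySem.List.pyGetD field y []) x 0 = 0
    · rw [if_pos h, ih]; simp [h]; ring
    · rw [if_neg h]; simp [h]

lemma pvPO_true (bs : List Bool) : pvPO bs true = List.replicate bs.length true := by
  induction bs with
  | nil => simp [pvPO]
  | cons b bs ih => simp [pvPO, ih, List.replicate_succ]

lemma pvCnt_replicate (n : Nat) : pvCnt (List.replicate n true) = (n : Int) := by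
  induction n with
  | zero => simp [pvCnt]
  | succ n ih => simp [List.replicate_succ, pvCnt, ih]; ring

lemma pvCnt_pvPO_false (bs : List Bool) :
    pvCnt (pvPO bs false) = (bs.length : Int) - pvVA bs := by
  induction bs with
  | nil => simp [pvPO, pvCnt, pvVA]
  | cons b bs ih =>
    cases b with
    | false => simp [pvPO, pvCnt, pvVA, ih]; ring
    | true => simp [pvPO, pvCnt, pvVA, pvPO_true, pvCnt_replicate]; ring

lemma pvMono_pvPO (bs : List Bool) (acc : Bool) : pvMono (pvPO bs acc) := by
  induction bs generalizing acc with
  | nil => simp [pvPO, pvMono]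
  | cons b bs ih =>
    refine ⟨fun h c hc => ?_, ih _⟩
    rw [h, pvPO_true] at hc
    exact List.eq_of_mem_replicate hc

lemma pvCnt_bounds (bs : List Bool) : 0 ≤ pvCnt bs ∧ pvCnt bs ≤ (bs.length : Int) := by
  induction bs with
  | nil => simp [pvCnt]
  | cons b bs ih => simp only [pvCnt, List.length_cons]; split_ifs <;> push_cast <;> omega

lemma pvMism_all_true_left (bs cs : List Bool) (h : ∀ e ∈ bs, e = true)
    (hl : bs.length = cs.length) : pvMism bs cs = (bs.length : Int) - pvCnt cs := by
  induction bs generalizing cs with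
  | nil => cases cs with
    | nil => simp [pvMism, pvCnt]
    | cons c cs => simp at hl
  | cons b bs ih =>
    cases cs with
    | nil => simp at hl
    | cons c cs =>
      have hb : b = true := h b (by simp)
      subst hb
      have := ih cs (fun e he => h e (by simp [he])) (by simpa using hl)
      cases c <;> simp [pvMism, pvCnt, this] <;> ring

-- pointwise mismatch count is symmetric
lemma pvMism_comm : ∀ (bs cs : List Bool), pvMism bs cs = pvMism cs bs := by
  intro bs
  induction bs with
  | nil => intro cs; cases cs <;> simp [pvMism]
  | cons b bs ih =>
    intro cs
    cases cs with
    | nil => simp [pvMism]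
    | cons c cs =>
      simp only [pvMism, ih cs]
      congr 1
      by_cases h : b = c <;> simp [h, ne_comm]

lemma pvCnt_all_true (bs : List Bool) (h : ∀ e ∈ bs, e = true) :
    pvCnt bs = (bs.length : Int) := by
  induction bs with
  | nil => simp [pvCnt]
  | cons b bs ih =>
    have hb : b = true := h b (by simp)
    simp [pvCnt, hb, ih (fun e he => h e (by simp [he]))]
    ring

-- the step lemma: for two once-true-stays-true sequences of equal length,
-- |#trues − #trues| equals the number of pointwise mismatches
lemma pvStep (bs : List Bool) : ∀ (cs : List Bool), pvMono bs → pvMono cs →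
    bs.length = cs.length → |pvCnt bs - pvCnt cs| = pvMism bs cs := by
  induction bs with
  | nil =>
    intro cs _ _ hl
    cases cs with
    | nil => simp [pvCnt, pvMism]
    | cons c cs => simp at hl
  | cons b bs ih =>
    intro cs hm hmc hl
    cases cs with
    | nil => simp at hl
    | cons c cs =>
      have hl' : bs.length = cs.length := by simpa using hl
      cases b <;> cases c
      · -- false, false
        simpa [pvCnt, pvMism] using ih cs hm.2 hmc.2 hl'
      · -- b false, c true
        have hct : ∀ e ∈ cs, e = true := hmc.1 rfl
        have h1 := pvMism_all_true_left cs bs hct hl'.symm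
        have h2 := pvCnt_bounds bs
        have h3 := pvCnt_all_true cs hct
        simp only [pvCnt, pvMism]
        norm_num
        rw [pvMism_comm, h1, h3, abs_of_nonpos (by rw [hl'] at h2; omega)]
        rw [hl'] at h2; omega
      · -- b true, c false
        have hbt : ∀ e ∈ bs, e = true := hm.1 rfl
        have h1 := pvMism_all_true_left bs cs hbt hl'
        have h2 := pvCnt_bounds cs
        have h3 := pvCnt_all_true bs hbt
        simp only [pvCnt, pvMism]
        norm_num
        rw [h1, h3, abs_of_nonneg (by rw [← hl'] at h2; omega)]
        omega
      · -- true, true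
        have hbt : ∀ e ∈ bs, e = true := hm.1 rfl
        have hct : ∀ e ∈ cs, e = true := hmc.1 rfl
        have h3 := pvCnt_all_true bs hbt
        have h4 := pvCnt_all_true cs hct
        have h5 : pvMism bs cs = 0 := by
          rw [pvMism_all_true_left bs cs hbt hl', h4, hl']; ring
        simp [pvCnt, pvMism, h3, h4, hl', h5]

lemma pvPO_length (bs : List Bool) : ∀ acc, (pvPO bs acc).length = bs.length := by
  induction bs with
  | nil => intro acc; simp [pvPO]
  | cons b bs ih => intro acc; simp [pvPO, ih]

-- A's adjacent-difference fold over a consecutive range as a sum of |h x - h (x+1)|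
lemma pvADiffs_range_aux (h : Int → Int) : ∀ (n : Nat) (a b : Int), a + n = b →
    pvADiffs ((PySem.List.pyRange a b 1).map h)
      = ((PySem.List.pyRange a (b - 1) 1).map (fun x => |h x - h (x + 1)|)).sum := by
  intro n
  induction n with
  | zero =>
    intro a b hb
    rw [PySem.List.pyRange_one_eq_nil (by omega), PySem.List.pyRange_one_eq_nil (by omega)]
    simp [pvADiffs]
  | succ m ih =>
    intro a b hb
    rw [PySem.List.pyRange_one_cons (by omega)]
    cases m with
    | zero =>
      rw [PySem.List.pyRange_one_eq_nil (by omega), PySem.List.pyRange_one_eq_nil (by omega)]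
      simp [pvADiffs]
    | succ k =>
      rw [PySem.List.pyRange_one_cons (show a + 1 < b by omega)]
      simp only [List.map_cons, pvADiffs]
      rw [← List.map_cons, ← PySem.List.pyRange_one_cons (show a + 1 < b by omega),
        ih (a + 1) b (by omega), PySem.List.pyRange_one_cons (show a < b - 1 by omega)]
      simp

lemma pvADiffs_range (h : Int → Int) (a b : Int) :
    pvADiffs ((PySem.List.pyRange a b 1).map h)
      = ((PySem.List.pyRange a (b - 1) 1).map (fun x => |h x - h (x + 1)|)).sum := by
  by_cases hab : b ≤ a
  · rw [PySem.List.pyRange_one_eq_nil hab, PySem.List.pyRange_one_eq_nil (by omega)]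
    simp [pvADiffs]
  · exact pvADiffs_range_aux h (b - a).toNat a b (by omega)

-- exchanging a double sum
lemma pvSwap {α β : Type} (l : List α) (m : List β) (F : α → β → Int) :
    (l.map (fun s => ((m.map (F s)).sum))).sum
      = (m.map (fun x => ((l.map (fun s => F s x)).sum))).sum := by
  induction l with
  | nil => simp
  | cons s l ih =>
    simp only [List.map_cons, List.sum_cons, ih]
    exact (PySem.List.sum_map_add_int m (F s) _).symm

lemma pvMism_map {α : Type} (f g : α → Bool) : ∀ (l : List α),
    pvMism (l.map f) (l.map g) = (l.map (fun s => if f s ≠ g s then (1:Int) else 0)).sum := by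
  intro l
  induction l with
  | nil => simp [pvMism]
  | cons s l ih => simp [pvMism, ih]

-- B's crossing loop as a 0/1 sum
lemma pvBCross_sum (seen : List Bool) : ∀ (xs : List Int) (r : Int),
    pvBCross seen xs r = r + (xs.map (fun x =>
      if PySem.List.pyGetD seen x false ≠ PySem.List.pyGetD seen (x + 1) false then (1:Int)
      else 0)).sum := by
  intro xs
  induction xs with
  | nil => intro r; simp [pvBCross]
  | cons x xs ih =>
    intro r
    simp only [pvBCross, List.map_cons, List.sum_cons, ih]
    split_ifs <;> ring

lemma pvBMark_length (row : List Int) : ∀ (xs : List Int) (seen : List Bool),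
    (pvBMark row xs seen).length = seen.length := by
  intro xs
  induction xs with
  | nil => intro seen; simp [pvBMark]
  | cons x xs ih =>
    intro seen
    simp only [pvBMark, ih]
    split_ifs <;> simp [PySem.List.length_pySetD]

-- pointwise effect of B's marking pass on the seen vector
lemma pvBMark_getD (row : List Int) : ∀ (xs : List Int) (seen : List Bool) (x : Int),
    0 ≤ x → x < (seen.length : Int) → (∀ x' ∈ xs, 0 ≤ x') →
    PySem.List.pyGetD (pvBMark row xs seen) x false
      = (PySem.List.pyGetD seen x false
         || (decide (x ∈ xs) && decide (PySem.List.pyGetD row x 0 ≠ 0))) := by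
  intro xs
  induction xs with
  | nil => intro seen x hx0 hx1 _; simp [pvBMark]
  | cons x' xs ih =>
    intro seen x hx0 hx1 hxs
    have hx'0 : 0 ≤ x' := hxs x' (by simp)
    simp only [pvBMark]
    set seen1 := if PySem.List.pyGetD row x' 0 ≠ 0 then PySem.List.pySetD seen x' true else seen
      with hseen1
    have hlen1 : seen1.length = seen.length := by
      rw [hseen1]; split_ifs <;> simp [PySem.List.length_pySetD]
    rw [ih seen1 x hx0 (by rw [hlen1]; exact hx1) (fun z hz => hxs z (by simp [hz]))]
    have key : PySem.List.pyGetD seen1 x false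
        = (PySem.List.pyGetD seen x false
           || (decide (x = x') && decide (PySem.List.pyGetD row x 0 ≠ 0))) := by
      by_cases hxx : x = x'
      · subst hxx
        by_cases hc : PySem.List.pyGetD row x 0 ≠ 0
        · rw [hseen1, if_pos hc, PySem.List.pySetD_of_nonneg seen true hx0,
            PySem.List.pyGetD_eq_getElem _ false hx0 (by simpa using hx1)]
          simp [List.getElem_set_self, hc]
        · rw [hseen1, if_neg hc]
          simp at hc
          simp [hc]
      · have hne : x'.toNat ≠ x.toNat := by omega
        have hgd : PySem.List.pyGetD seen1 x false = PySem.List.pyGetD seen x false := by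
          rw [hseen1]
          split_ifs with hc
          · rw [PySem.List.pySetD_of_nonneg seen true hx'0,
              PySem.List.pyGetD_eq_getElem _ false hx0 (by simpa [List.length_set] using hx1),
              PySem.List.pyGetD_eq_getElem seen false hx0 (by simpa using hx1)]
            apply List.getElem_set_ne hne
          · rfl
        simp [hgd, hxx]
    rw [key]
    by_cases hmem : x ∈ x' :: xs <;> by_cases hc : PySem.List.pyGetD row x 0 ≠ 0 <;>
      by_cases hxx : x = x' <;> simp_all

-- the states of B's seen vector seen through one column form the prefix-or sequence
def pvStates (field : List (List Int)) (width : Int) : List Int → List Bool → List (List Bool)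
  | [], _ => []
  | y :: ys, seen =>
    let s' := pvBMark (PySem.List.pyGetD field y []) (PySem.List.pyRange 1 (width - 1) 1) seen
    s' :: pvStates field width ys s'

lemma pvBRows_sum (field : List (List Int)) (w : Int) : ∀ (ys : List Int) (seen : List Bool) (r : Int),
    pvBRows field w ys seen r
      = r + ((pvStates field w ys seen).map
          (fun s => pvBCross s (PySem.List.pyRange 1 (w - 2) 1) 0)).sum := by
  intro ys
  induction ys with
  | nil => intro seen r; simp [pvBRows, pvStates]
  | cons y ys ih =>
    intro seen r
    simp only [pvBRows, pvStates, List.map_cons, List.sum_cons, ih]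
    rw [pvBCross_sum, pvBCross_sum]
    ring

lemma pvStates_col (field : List (List Int)) (w : Int) : ∀ (ys : List Int) (seen : List Bool) (x : Int),
    1 ≤ x → x < w - 1 → x < (seen.length : Int) →
    (pvStates field w ys seen).map (fun s => PySem.List.pyGetD s x false)
      = pvPO (ys.map (fun y =>
          decide (PySem.List.pyGetD (PySem.List.pyGetD field y []) x 0 ≠ 0)))
          (PySem.List.pyGetD seen x false) := by
  intro ys
  induction ys with
  | nil => intro seen x _ _ _; simp [pvStates, pvPO]
  | cons y ys ih =>
    intro seen x hx1 hx2 hlen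
    simp only [pvStates, List.map_cons, pvPO]
    have hmark := pvBMark_getD (PySem.List.pyGetD field y [])
      (PySem.List.pyRange 1 (w - 1) 1) seen x (by omega) hlen
      (fun z hz => by have := PySem.List.mem_pyRange_one.mp hz; omega)
    have hmem : x ∈ PySem.List.pyRange 1 (w - 1) 1 := PySem.List.mem_pyRange_one.mpr ⟨hx1, hx2⟩
    rw [hmark]
    simp only [hmem, decide_true, Bool.true_and]
    congr 1
    rw [ih _ x hx1 hx2 (by rw [pvBMark_length]; exact hlen), hmark]
    simp [hmem]

lemma pyGetD_replicate_false (n : Nat) (x : Int) :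
    PySem.List.pyGetD (List.replicate n false) x false = false := by
  cases h : PySem.List.pyGet? (List.replicate n false) x with
  | none => simp [PySem.List.pyGetD, h]
  | some v =>
    have hv := PySem.List.mem_of_pyGet?_eq_some (List.replicate n false) h
    have : v = false := List.eq_of_mem_replicate hv
    simp [PySem.List.pyGetD, h, this]

-- the two ports agree on every field (Pre_ only matters for Python faithfulness)
lemma ports_eq (field : List (List Int)) :
    bumpiness_height field = bumpiness_height_alt field := by
  cases field with
  | nil => decide
  | cons r0 rest =>
    unfold bumpiness_height bumpiness_height_alt
    simp only [PySem.List.pyGet?_zero_cons, Option.getD_some]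
    set w : Int := (r0.length : Int) with hw
    set rows : Int := ((r0 :: rest).length : Int) with hrows
    have hrows1 : 1 ≤ rows := by rw [hrows]; simp
    set yr := PySem.List.pyRange 0 (rows - 1) 1 with hyr
    have hyrlen : (yr.length : Int) = rows - 1 := by
      rw [hyr, PySem.List.length_pyRange_one]; omega
    -- the per-column raw-cell sequence over the scanned rows
    set bs : Int → List Bool := fun x => yr.map (fun y =>
      decide (PySem.List.pyGetD (PySem.List.pyGetD (r0 :: rest) y []) x 0 ≠ 0)) with hbs
    have hbslen : ∀ x, ((bs x).length : Int) = rows - 1 := by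
      intro x; rw [hbs]; simpa using hyrlen
    -- A's column height equals the true-count of the prefix-or sequence
    have hheight : ∀ x : Int,
        rows - pvAVoid (r0 :: rest) x yr 0 - 1 = pvCnt (pvPO (bs x) false) := by
      intro x
      rw [pvAVoid_eq_pvVA, pvCnt_pvPO_false]
      have h1 := hbslen x
      simp only [hbs] at h1 ⊢
      rw [h1]
      ring
    -- A's side: sum of |h x - h (x+1)| over the interior pairs
    rw [pvADiffs_range]
    have hww : w - 1 - 1 = w - 2 := by ring
    rw [hww]
    -- B's side: sum over rows of crossings, exchanged into a sum over pairs
    rw [pvBRows_sum, zero_add]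
    have hcross : ((pvStates (r0 :: rest) w yr (List.replicate w.toNat false)).map
          ((fun s => pvBCross s (PySem.List.pyRange 1 (w - 2) 1) 0))).sum
        = ((PySem.List.pyRange 1 (w - 2) 1).map (fun x =>
            ((pvStates (r0 :: rest) w yr (List.replicate w.toNat false)).map
              (fun s => if PySem.List.pyGetD s x false ≠ PySem.List.pyGetD s (x + 1) false
                then (1:Int) else 0)).sum)).sum := by
      rw [← pvSwap]
      congr 1
      apply List.map_congr_left
      intro s _
      rw [pvBCross_sum]
      ring
    rw [hcross]
    congr 1
    apply List.map_congr_left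
    intro x hxmem
    obtain ⟨hx1, hx2⟩ := PySem.List.mem_pyRange_one.mp hxmem
    set st := pvStates (r0 :: rest) w yr (List.replicate w.toNat false) with hst
    have hwnat : ((List.replicate w.toNat false).length : Int) = w := by
      simp [hw]
    have hcol : ∀ z : Int, 1 ≤ z → z < w - 1 →
        st.map (fun s => PySem.List.pyGetD s z false) = pvPO (bs z) false := by
      intro z hz1 hz2
      rw [hst, pvStates_col _ _ _ _ z hz1 hz2 (by omega), pyGetD_replicate_false]
    rw [hheight x, hheight (x + 1), pvStep _ _ (pvMono_pvPO _ _) (pvMono_pvPO _ _)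
      (by rw [pvPO_length, pvPO_length]; have := hbslen x; have := hbslen (x + 1); omega),
      ← hcol x hx1 (by omega), ← hcol (x + 1) (by omega) (by omega)]
    exact pvMism_map (fun s => PySem.List.pyGetD s x false)
      (fun s => PySem.List.pyGetD s (x + 1) false) st

-- ===== VERDICT (by name: the statement is the Claim_ definition above) =====
theorem bumpiness_height_spec : Claim_equal_bumpiness_height := by
  intro field _ _
  unfold Spec_bumpiness_height
  exact ports_eq field
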